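-- pv_equiv track=rewrite | github.com/API-Apex-Grid/Transformer-Tracker | backend/src/main/resources/export/plot_bounding_boxes.py | parse_strings
-- ===== SOURCE A (Python) =====
-- from typing import Iterable, List, Sequence, Tuple
--
-- def parse_strings(node, expected: int) -> List[str]:
--     values: List[str] = []
--     if isinstance(node, Sequence):
--         for entry in node:
--             if isinstance(entry, str):
--                 values.append(entry)
--             elif entry is None:
--                 values.append("")
--             else:
--                 values.append(str(entry))
--     if len(values) < expected:
--         values.extend("" for _ in range(expected - len(values)))
--     return values[:expected]
-- ===== SOURCE B (Python) =====
-- from typing import Iterable, List, Sequence, Tuple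
--
--
-- def _item(src, i):
--     # The string for output slot i: convert src[i] if it exists, else "".
--     if i < len(src):
--         e = src[i]
--         if isinstance(e, str):
--             return e
--         if e is None:
--             return ""
--         return str(e)
--     return ""
--
--
-- def parse_strings(node, expected: int) -> List[str]:
--     src = node if isinstance(node, Sequence) else ()
--     return [_item(src, i) for i in range(expected)]
-- ===== Notes on version B (the rewrite author's own statement) =====
-- stated objective: simpler
-- what changed: B is output-slot driven: a single comprehension over range(expected) that fills each output position i with the converted src[i] or "", eliminating A's build-all list, the pad pass and the truncating slice entirely.
-- intended difference: For negative expected with len(node) > -expected, A's values[:expected] slice accidentally returns the list with the last |expected| elements dropped, while B returns [] , the intended result for a request of a non-positive number of strings. — e.g. on parse_strings([some "a", some "b"], -1): A returns ["a"], B returns []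
import Mathlib
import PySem

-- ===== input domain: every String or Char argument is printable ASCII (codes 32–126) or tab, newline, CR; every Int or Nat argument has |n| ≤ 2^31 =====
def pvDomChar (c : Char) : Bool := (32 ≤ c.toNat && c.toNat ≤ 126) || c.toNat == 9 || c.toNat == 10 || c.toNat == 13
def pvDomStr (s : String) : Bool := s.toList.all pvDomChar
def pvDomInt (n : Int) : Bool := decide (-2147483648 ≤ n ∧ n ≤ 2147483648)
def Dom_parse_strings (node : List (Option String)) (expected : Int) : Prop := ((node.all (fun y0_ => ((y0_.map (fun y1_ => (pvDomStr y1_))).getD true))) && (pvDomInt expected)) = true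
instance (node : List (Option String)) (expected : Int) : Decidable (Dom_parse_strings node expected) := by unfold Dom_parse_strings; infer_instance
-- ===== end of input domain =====

-- B fills each output slot i of range(expected) directly (no build/pad/truncate passes);
-- on negative expected (A: slice artefact, B: []) see D_parse_strings below.
-- ===== PORT A =====
def parse_strings (node : List (Option String)) (expected : Int) : List String :=
  -- for entry in node: append entry / "" (entry is str or None under the declared type)
  let values : List String :=
    node.foldl (fun acc entry =>
      match entry with
      | some s => acc ++ [s]
      | none => acc ++ [""]) []
  let values :=
    if (values.length : Int) < expected then
      values ++ List.replicate (expected - (values.length : Int)).toNat ""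
    else values
  PySem.List.slice values none (some expected)

-- ===== PORT B =====
-- _item(src, i): convert src[i] if 0 ≤ i < len(src), else "" (the index is guarded, so pyGet? is some)
def pvItem (src : List (Option String)) (i : Int) : String :=
  if i < (src.length : Int) then
    match PySem.List.pyGet? src i with
    | some (some s) => s
    | some none => ""
    | none => ""   -- unreachable: 0 ≤ i from range(expected) and i < len(src)
  else ""

def parse_strings_alt (node : List (Option String)) (expected : Int) : List String :=
  (PySem.List.pyRange 0 expected 1).map (pvItem node)

-- ===== PRECONDITION & SPEC =====
-- For negative expected with len(node) > -expected, A's values[:expected] slice accidentally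
-- returns the list with the last |expected| elements dropped, while B returns [], the intended
-- result for a request of a non-positive number of strings.
def D_parse_strings (node : List (Option String)) (expected : Int) : Prop :=
  expected < 0 ∧ -expected < (node.length : Int)
instance (node : List (Option String)) (expected : Int) : Decidable (D_parse_strings node expected) := by unfold D_parse_strings; infer_instance

def Spec_parse_strings (node : List (Option String)) (expected : Int) (out : List String) : Prop := ¬ D_parse_strings node expected → out = parse_strings_alt node expected
instance (node : List (Option String)) (expected : Int) (out : List String) : Decidable (Spec_parse_strings node expected out) := by unfold Spec_parse_strings; infer_instance

def pvDiffWitness_parse_strings : List (Option String) × Int := ([some "a", some "b"], -1)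
def pvDiffWitnessOut_parse_strings : (List String) × (List String) := (["a"], [])

-- ===== CLAIM (what is proved, stated in full; the proofs are below) =====
def Claim_unchanged_parse_strings : Prop := ∀ (node : List (Option String)) (expected : Int), Dom_parse_strings node expected → Spec_parse_strings node expected (parse_strings node expected)
def Claim_changed_parse_strings : Prop := Dom_parse_strings (pvDiffWitness_parse_strings.1) (pvDiffWitness_parse_strings.2) ∧ D_parse_strings (pvDiffWitness_parse_strings.1) (pvDiffWitness_parse_strings.2) ∧ parse_strings (pvDiffWitness_parse_strings.1) (pvDiffWitness_parse_strings.2) = pvDiffWitnessOut_parse_strings.1 ∧ parse_strings_alt (pvDiffWitness_parse_strings.1) (pvDiffWitness_parse_strings.2) = pvDiffWitnessOut_parse_strings.2 ∧ pvDiffWitnessOut_parse_strings.1 ≠ pvDiffWitnessOut_parse_strings.2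
def Claim_exact_parse_strings : Prop := ∀ (node : List (Option String)) (expected : Int), Dom_parse_strings node expected → D_parse_strings node expected → parse_strings node expected ≠ parse_strings_alt node expected

-- ===== LEMMAS AND PROOFS =====
lemma foldl_conv (l : List (Option String)) (acc : List String) :
    l.foldl (fun acc entry =>
      match entry with
      | some s => acc ++ [s]
      | none => acc ++ [""]) acc = acc ++ l.map (fun o => o.getD "") := by
  induction l generalizing acc with
  | nil => simp
  | cons h t ih =>
    cases h <;> simp [List.foldl, ih]

lemma pvItem_eq (node : List (Option String)) (k : Nat) :
    pvItem node (k : Int) =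
      if h : k < node.length then (node[k].getD "") else "" := by
  unfold pvItem
  by_cases h : k < node.length
  · rw [if_pos (by exact_mod_cast h), PySem.List.pyGet?_natCast]
    rw [List.getElem?_eq_getElem h, dif_pos h]
    cases node[k] <;> simp
  · rw [if_neg (by exact_mod_cast h)]
    simp [h]

lemma parse_strings_alt_eq (node : List (Option String)) (expected : Int) :
    parse_strings_alt node expected =
      (List.range expected.toNat).map (fun k =>
        if h : k < node.length then (node[k].getD "") else "") := by
  unfold parse_strings_alt
  rw [PySem.List.pyRange_one]
  simp only [List.map_map, Int.sub_zero]
  apply List.map_congr_left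
  intro k _
  simp only [Function.comp, Int.zero_add]
  exact pvItem_eq node k

lemma parse_strings_eq_of_nonneg (node : List (Option String)) (expected : Int)
    (hB : 0 ≤ expected) :
    parse_strings node expected = parse_strings_alt node expected := by
  unfold parse_strings
  simp only [foldl_conv, List.nil_append]
  rw [parse_strings_alt_eq, PySem.List.slice_to _ hB]
  set m := node.map (fun o => o.getD "") with hm
  have hml : m.length = node.length := by simp [hm]
  by_cases h : (m.length : Int) < expected
  · rw [if_pos h]
    apply List.ext_getElem
    · simp [hml]; omega
    · intro k h1 h2
      simp only [List.length_take, List.length_append, List.length_replicate] at h1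
      have hk : k < expected.toNat := by omega
      by_cases hkn : k < node.length
      · rw [List.getElem_take, List.getElem_append_left (by simp [hml]; omega)]
        simp [hm, hkn]
      · rw [List.getElem_take, List.getElem_append_right (by simp [hml]; omega),
          List.getElem_replicate]
        simp [hkn]
  · rw [if_neg h]
    apply List.ext_getElem
    · simp [hml]; omega
    · intro k h1 h2
      simp only [List.length_take] at h1
      have hkn : k < node.length := by rw [← hml]; omega
      rw [List.getElem_take]
      simp [hm, hkn]

lemma parse_strings_length_neg (node : List (Option String)) (expected : Int)
    (h : expected < 0) :
    (parse_strings node expected).length = (node.length + expected).toNat := by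
  unfold parse_strings
  simp only [foldl_conv, List.nil_append]
  rw [if_neg (by simp; omega)]
  simp only [PySem.List.slice, PySem.List.clampIdx, List.length_take, List.length_map]
  split_ifs <;> simp <;> omega

-- ===== VERDICT (by name: the statement is the Claim_ definition above) =====
theorem parse_strings_spec : Claim_unchanged_parse_strings := by
  intro node expected _ hD
  unfold D_parse_strings at hD
  push Not at hD
  by_cases hB : 0 ≤ expected
  · exact parse_strings_eq_of_nonneg node expected hB
  · -- expected < 0 and node.length ≤ -expected: both sides are []
    have h1 : (parse_strings node expected).length = 0 := by
      rw [parse_strings_length_neg node expected (by omega)]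
      have := hD (by omega)
      omega
    have h2 : (parse_strings_alt node expected).length = 0 := by
      rw [parse_strings_alt_eq]
      simp; omega
    rw [List.length_eq_zero_iff] at h1 h2
    rw [h1, h2]

theorem parse_strings_changed : Claim_changed_parse_strings := by
  unfold Claim_changed_parse_strings; decide

theorem parse_strings_tight : Claim_exact_parse_strings := by
  intro node expected _ hD
  rcases hD with ⟨h1, h2⟩
  intro hEq
  have hA : (parse_strings node expected).length = (node.length + expected).toNat :=
    parse_strings_length_neg node expected h1
  have hB : (parse_strings_alt node expected).length = 0 := by
    rw [parse_strings_alt_eq]; simp; omega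
  rw [hEq, hB] at hA
  omega
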